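-- pv_equiv track=rewrite | github.com/jerronl/Crossformer | data/data_def.py | extract_cols
-- ===== SOURCE A (Python) =====
-- def extract_cols(cols, names):
--     res = []
--     for c in names:
--         if c in cols:
--             res += extract_cols(cols, cols[c])
--         else:
--             res.append(c)
--     return res
-- ===== SOURCE B (Python) =====
-- def extract_cols(cols, names):
--     # Iterative DFS with an explicit stack instead of recursion.
--     stack = list(reversed(names))
--     res = []
--     while stack:
--         c = stack.pop()
--         if c in cols:
--             stack.extend(reversed(cols[c]))
--         else:
--             res.append(c)
--     return res
-- ===== Notes on version B (the rewrite author's own statement) =====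
-- stated objective: alternative
-- what changed: Replaces A's recursion (which builds and concatenates a fresh list per nested definition) with an iterative depth-first traversal over an explicit stack that appends each leaf once to a single result list.
import Mathlib
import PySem

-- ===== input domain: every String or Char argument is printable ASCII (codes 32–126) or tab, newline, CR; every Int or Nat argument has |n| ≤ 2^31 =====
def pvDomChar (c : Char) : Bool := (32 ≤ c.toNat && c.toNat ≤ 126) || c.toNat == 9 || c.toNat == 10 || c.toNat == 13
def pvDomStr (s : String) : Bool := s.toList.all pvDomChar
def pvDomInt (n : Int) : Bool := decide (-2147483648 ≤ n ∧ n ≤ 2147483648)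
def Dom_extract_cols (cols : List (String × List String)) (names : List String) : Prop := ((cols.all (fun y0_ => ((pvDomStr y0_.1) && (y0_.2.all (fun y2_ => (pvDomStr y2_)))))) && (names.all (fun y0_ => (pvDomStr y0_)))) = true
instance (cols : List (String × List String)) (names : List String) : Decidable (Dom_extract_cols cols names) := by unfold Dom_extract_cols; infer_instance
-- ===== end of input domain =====

-- B replaces A's recursive flattening by an iterative DFS over an explicit stack (alternative decomposition, same result).


-- ===== PORT A =====
-- 'c in cols' / 'cols[c]' on the Python dict: first-match association-list lookup (Python dict keys are unique, so exact).
def pvGet? (cols : List (String × List String)) (c : String) : Option (List String) :=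
  (cols.find? (fun p => p.1 == c)).map Prod.snd

-- A's recursion, with a fuel bound on the recursion DEPTH; on Pre_ (no cycle reachable
-- from names) the depth is at most the number of keys, so fuel cols.length + 1 never runs out.
def extract_cols_go (cols : List (String × List String)) : Nat → List String → List String
  | 0, _ => []
  | fuel+1, names =>
    names.foldl (fun res c =>
      match pvGet? cols c with
      | some vs => res ++ extract_cols_go cols fuel vs
      | none => res ++ [c]) []

def extract_cols (cols : List (String × List String)) (names : List String) : List String :=
  extract_cols_go cols (cols.length + 1) names

-- ===== PORT B =====
-- Node-count weight of one name (fuelled the same way); Σ weights bounds the number of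
-- iterations of B's while-loop, giving it a totality fuel.
def extract_cols_altW (cols : List (String × List String)) : Nat → String → Nat
  | 0, _ => 1
  | n+1, c =>
    match pvGet? cols c with
    | some vs => 1 + (vs.map (extract_cols_altW cols n)).sum
    | none => 1

-- Source B's while-loop; the Lean list's HEAD is the Python stack's top (its last element),
-- so Python's reversed pushes become plain prepends here.
def extract_cols_alt_loop (cols : List (String × List String)) : Nat → List String → List String → List String
  | 0, _, res => res
  | _+1, [], res => res
  | fuel+1, c :: stack, res =>
    match pvGet? cols c with
    | some vs => extract_cols_alt_loop cols fuel (vs ++ stack) res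
    | none => extract_cols_alt_loop cols fuel stack (res ++ [c])

def extract_cols_alt (cols : List (String × List String)) (names : List String) : List String :=
  extract_cols_alt_loop cols
    ((names.map (extract_cols_altW cols (cols.length + 1))).sum + 1) names []

-- ===== PRECONDITION & SPEC =====
def pvIsKey (cols : List (String × List String)) (c : String) : Bool := (pvGet? cols c).isSome

-- one stratification round: the keys all of whose key-children are already stratified
def pvStep (cols : List (String × List String)) (S : List String) : List String :=
  (cols.map Prod.fst).filter (fun k =>
    match pvGet? cols k with
    | some vs => vs.all (fun d => !pvIsKey cols d || S.contains d)
    | none => true)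

def pvIter (cols : List (String × List String)) : Nat → List String
  | 0 => []
  | n+1 => pvStep cols (pvIter cols n)

-- Pre_ excludes exactly the inputs where expanding some name reaches a cycle of cols:
-- there A raises RecursionError (and B's loop never terminates); everywhere else A returns.
def Pre_extract_cols (cols : List (String × List String)) (names : List String) : Prop :=
  ∀ c ∈ names, pvIsKey cols c = true → c ∈ pvIter cols cols.length

instance (cols : List (String × List String)) (names : List String) : Decidable (Pre_extract_cols cols names) := by
  unfold Pre_extract_cols; infer_instance

def pvWitness_extract_cols : (List (String × List String)) × List String :=
  ([("a", ["x", "y"]), ("b", ["a", "z"])], ["b", "w"])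

def Spec_extract_cols (cols : List (String × List String)) (names : List String) (out : List String) : Prop := out = extract_cols_alt cols names
instance (cols : List (String × List String)) (names : List String) (out : List String) : Decidable (Spec_extract_cols cols names out) := by unfold Spec_extract_cols; infer_instance

-- ===== CLAIM (what is proved, stated in full; the proofs are below) =====
def Claim_equal_extract_cols : Prop := ∀ (cols : List (String × List String)) (names : List String), Dom_extract_cols cols names → Pre_extract_cols cols names → Spec_extract_cols cols names (extract_cols cols names)

-- ===== LEMMAS AND PROOFS =====

theorem pv_flatMap_congr {α β : Type} (l : List α) (f g : α → List β)
    (h : ∀ x ∈ l, f x = g x) : l.flatMap f = l.flatMap g := by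
  induction l with
  | nil => rfl
  | cons x t ih =>
    simp only [List.flatMap_cons]
    rw [h x (by simp), ih (fun y hy => h y (by simp [hy]))]

-- membership in one stratification round unfolds to: every key-child lies in S
theorem pvStep_children (cols : List (String × List String)) (S : List String)
    (k : String) (vs : List String) (hk : k ∈ pvStep cols S) (hg : pvGet? cols k = some vs) :
    ∀ d ∈ vs, pvIsKey cols d = true → d ∈ S := by
  intro d hd hkey
  unfold pvStep at hk
  have := (List.mem_filter.mp hk).2
  rw [hg] at this
  simp only [List.all_eq_true] at this
  have := this d hd
  rw [hkey] at this
  simpa using this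

-- one stratification round is monotone in the already-stratified set
theorem pvStep_mono (cols : List (String × List String)) (S T : List String)
    (h : ∀ x ∈ S, x ∈ T) : ∀ k ∈ pvStep cols S, k ∈ pvStep cols T := by
  intro k hk
  unfold pvStep at hk ⊢
  rw [List.mem_filter] at hk ⊢
  obtain ⟨hk1, hk2⟩ := hk
  refine ⟨hk1, ?_⟩
  cases hg : pvGet? cols k with
  | none => simp
  | some vs =>
    rw [hg] at hk2
    simp only [List.all_eq_true] at hk2 ⊢
    intro d hd
    have hd' := hk2 d hd
    rcases Bool.or_eq_true _ _ |>.mp hd' with h1 | h1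
    · simp [h1]
    · have : d ∈ S := by simpa using h1
      have : d ∈ T := h d this
      simp [this]

theorem pvIter_sub (cols : List (String × List String)) :
    ∀ n, ∀ x ∈ pvIter cols n, x ∈ pvIter cols (n + 1) := by
  intro n
  induction n with
  | zero => intro x hx; exact absurd hx (by simp [pvIter])
  | succ m ih =>
    intro x hx
    exact pvStep_mono cols (pvIter cols m) (pvIter cols (m + 1)) ih x hx

-- every element of ns whose lookup succeeds is stratified at level n
def pvSat (cols : List (String × List String)) (n : Nat) (ns : List String) : Prop :=
  ∀ c ∈ ns, ∀ vs, pvGet? cols c = some vs → c ∈ pvIter cols n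

theorem extract_cols_go_succ (cols : List (String × List String)) (fuel : Nat) (ns : List String) :
    extract_cols_go cols (fuel + 1) ns
      = ns.flatMap (fun c =>
          match pvGet? cols c with
          | some vs => extract_cols_go cols fuel vs
          | none => [c]) := by
  have h : (fun (res : List String) c =>
      match pvGet? cols c with
      | some vs => res ++ extract_cols_go cols fuel vs
      | none => res ++ [c])
    = fun (res : List String) c => res ++ (match pvGet? cols c with
      | some vs => extract_cols_go cols fuel vs
      | none => [c]) := by
    funext res c; cases pvGet? cols c <;> rfl
  rw [extract_cols_go, h, PySem.List.foldl_append_eq_flatMap]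
  simp

-- fuel-insensitivity of A's recursion above the stratification level
theorem extract_cols_go_ins (cols : List (String × List String)) :
    ∀ n ns f₁ f₂, pvSat cols n ns → n < f₁ → n < f₂ →
      extract_cols_go cols f₁ ns = extract_cols_go cols f₂ ns := by
  intro n
  induction n with
  | zero =>
    intro ns f₁ f₂ hs h1 h2
    obtain ⟨a, rfl⟩ := Nat.exists_eq_succ_of_ne_zero (Nat.pos_iff_ne_zero.mp h1)
    obtain ⟨b, rfl⟩ := Nat.exists_eq_succ_of_ne_zero (Nat.pos_iff_ne_zero.mp h2)
    rw [extract_cols_go_succ, extract_cols_go_succ]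
    apply pv_flatMap_congr
    intro c hc
    cases hg : pvGet? cols c with
    | none => rfl
    | some vs => exact absurd (hs c hc vs hg) (by simp [pvIter])
  | succ m ih =>
    intro ns f₁ f₂ hs h1 h2
    obtain ⟨a, rfl⟩ := Nat.exists_eq_succ_of_ne_zero (Nat.pos_iff_ne_zero.mp (Nat.lt_of_le_of_lt (Nat.zero_le _) h1))
    obtain ⟨b, rfl⟩ := Nat.exists_eq_succ_of_ne_zero (Nat.pos_iff_ne_zero.mp (Nat.lt_of_le_of_lt (Nat.zero_le _) h2))
    rw [extract_cols_go_succ, extract_cols_go_succ]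
    apply pv_flatMap_congr
    intro c hc
    cases hg : pvGet? cols c with
    | none => rfl
    | some vs =>
      have hcm : c ∈ pvIter cols (m + 1) := hs c hc vs hg
      have hsat : pvSat cols m vs := by
        intro d hd ws hw
        exact pvStep_children cols (pvIter cols m) c vs hcm hg d hd (by unfold pvIsKey; rw [hw]; rfl)
      exact ih vs a b hsat (by omega) (by omega)

-- fuel-insensitivity of the weight function
theorem extract_cols_altW_ins (cols : List (String × List String)) :
    ∀ n c f₁ f₂, (∀ vs, pvGet? cols c = some vs → c ∈ pvIter cols n) → n < f₁ → n < f₂ →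
      extract_cols_altW cols f₁ c = extract_cols_altW cols f₂ c := by
  intro n
  induction n with
  | zero =>
    intro c f₁ f₂ hs h1 h2
    obtain ⟨a, rfl⟩ := Nat.exists_eq_succ_of_ne_zero (Nat.pos_iff_ne_zero.mp h1)
    obtain ⟨b, rfl⟩ := Nat.exists_eq_succ_of_ne_zero (Nat.pos_iff_ne_zero.mp h2)
    cases hg : pvGet? cols c with
    | none => simp only [extract_cols_altW, hg]
    | some vs => exact absurd (hs vs hg) (by simp [pvIter])
  | succ m ih =>
    intro c f₁ f₂ hs h1 h2
    obtain ⟨a, rfl⟩ := Nat.exists_eq_succ_of_ne_zero (Nat.pos_iff_ne_zero.mp (Nat.lt_of_le_of_lt (Nat.zero_le _) h1))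
    obtain ⟨b, rfl⟩ := Nat.exists_eq_succ_of_ne_zero (Nat.pos_iff_ne_zero.mp (Nat.lt_of_le_of_lt (Nat.zero_le _) h2))
    cases hg : pvGet? cols c with
    | none => simp only [extract_cols_altW, hg]
    | some vs =>
      have hcm : c ∈ pvIter cols (m + 1) := hs vs hg
      have hmap : vs.map (extract_cols_altW cols a) = vs.map (extract_cols_altW cols b) := by
        apply List.map_congr_left
        intro d hd
        refine ih d a b (fun ws hw => ?_) (by omega) (by omega)
        exact pvStep_children cols (pvIter cols m) c vs hcm hg d hd (by unfold pvIsKey; rw [hw]; rfl)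
      simp only [extract_cols_altW, hg, hmap]

theorem extract_cols_altW_pos (cols : List (String × List String)) (f : Nat) (c : String) :
    1 ≤ extract_cols_altW cols f c := by
  cases f with
  | zero => simp [extract_cols_altW]
  | succ n =>
    cases hg : pvGet? cols c <;> simp only [extract_cols_altW, hg] <;> omega

-- total weight of a worklist
def pvM (cols : List (String × List String)) (ns : List String) : Nat :=
  (ns.map (extract_cols_altW cols (cols.length + 1))).sum

-- the loop invariant: if every key on the stack is stratified, then with enough fuel
-- B's loop appends exactly A's flattening of the stack
theorem extract_cols_loop_eq (cols : List (String × List String)) :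
    ∀ fuel stack res, pvSat cols cols.length stack → pvM cols stack < fuel →
      extract_cols_alt_loop cols fuel stack res
        = res ++ extract_cols_go cols (cols.length + 1) stack := by
  intro fuel
  induction fuel with
  | zero => intro stack res _ h; omega
  | succ f ih =>
    intro stack res hsat0 h
    cases stack with
    | nil => rw [extract_cols_alt_loop, extract_cols_go_succ]; simp
    | cons c rest =>
      have hM : pvM cols (c :: rest) = extract_cols_altW cols (cols.length + 1) c + pvM cols rest := by
        simp [pvM]
      have hsrest : pvSat cols cols.length rest := fun d hd ws hw => hsat0 d (by simp [hd]) ws hw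
      cases hg : pvGet? cols c with
      | none =>
        simp only [extract_cols_alt_loop, hg]
        have hpos := extract_cols_altW_pos cols (cols.length + 1) c
        rw [ih rest (res ++ [c]) hsrest (by omega)]
        rw [extract_cols_go_succ, extract_cols_go_succ, List.flatMap_cons]
        simp only [hg]
        simp
      | some vs =>
        -- c is a key on the stack: it is stratified, at a positive level
        have hck : c ∈ pvIter cols cols.length := hsat0 c (by simp) vs hg
        obtain ⟨m, hm⟩ : ∃ m, cols.length = m + 1 := by
          cases hL : cols.length with
          | zero => rw [hL] at hck; exact absurd hck (by simp [pvIter])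
          | succ m => exact ⟨m, rfl⟩
        have hck' : c ∈ pvIter cols (m + 1) := by rw [hm] at hck; exact hck
        have hsat : pvSat cols m vs := by
          intro d hd ws hw
          exact pvStep_children cols (pvIter cols m) c vs hck' hg d hd (by unfold pvIsKey; rw [hw]; rfl)
        -- the children are stratified at level cols.length too (monotonicity)
        have hsvs : pvSat cols cols.length vs := by
          intro d hd ws hw
          have := hsat d hd ws hw
          rw [hm]
          exact pvIter_sub cols m d this
        have hsapp : pvSat cols cols.length (vs ++ rest) := by
          intro d hd ws hw
          rcases List.mem_append.mp hd with h1 | h1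
          · exact hsvs d h1 ws hw
          · exact hsrest d h1 ws hw
        -- the weight of c strictly exceeds the total weight of its children
        have hmapW : vs.map (extract_cols_altW cols (cols.length)) = vs.map (extract_cols_altW cols (cols.length + 1)) := by
          apply List.map_congr_left
          intro d hd
          exact extract_cols_altW_ins cols m d (cols.length) (cols.length + 1)
            (fun ws hw => hsat d hd ws hw) (by omega) (by omega)
        have hW : extract_cols_altW cols (cols.length + 1) c
            = 1 + (vs.map (extract_cols_altW cols (cols.length + 1))).sum := by
          rw [show extract_cols_altW cols (cols.length + 1) c
              = match pvGet? cols c with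
                | some ws => 1 + (ws.map (extract_cols_altW cols cols.length)).sum
                | none => 1 from rfl]
          simp only [hg, hmapW]
        have hMapp : pvM cols (vs ++ rest) = (vs.map (extract_cols_altW cols (cols.length + 1))).sum + pvM cols rest := by
          simp [pvM]
        simp only [extract_cols_alt_loop, hg]
        rw [ih (vs ++ rest) res hsapp (by omega)]
        -- now identify A's value on (c :: rest) with its value on (vs ++ rest)
        have hgo : extract_cols_go cols (cols.length) vs = extract_cols_go cols (cols.length + 1) vs :=
          extract_cols_go_ins cols m vs (cols.length) (cols.length + 1) hsat (by omega) (by omega)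
        rw [extract_cols_go_succ, extract_cols_go_succ, List.flatMap_append, List.flatMap_cons]
        simp only [hg, ← extract_cols_go_succ, hgo]

-- ===== VERDICT (by name: the statement is the Claim_ definition above) =====
theorem extract_cols_spec : Claim_equal_extract_cols := by
  unfold Claim_equal_extract_cols
  intro cols names _hdom hpre
  have hsat : pvSat cols cols.length names := by
    intro c hc vs hv
    exact hpre c hc (by unfold pvIsKey; rw [hv]; rfl)
  unfold Spec_extract_cols extract_cols_alt extract_cols
  rw [extract_cols_loop_eq cols _ names [] hsat (by unfold pvM; omega)]
  simp
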